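-- pv_equiv track=rewrite | github.com/soumadip/LTE_HO_MY_MODS | py_codes/play3.py | count_wr
-- ===== SOURCE A (Python) =====
-- def count_wr(ueas, win = 4):
--     count = 0
--     skip = 0
--     for i in range (len (ueas) - win) :
--         if skip :
--             skip -= 1
--             continue
--         wind = ueas [i : i + win]
--         if len (set (wind)) > 2 :
--             count += 1
--             skip = win
--     return count
-- ===== SOURCE B (Python) =====
-- def _scan(w):
--     # frequency map and distinct count of the list w
--     freq = {}
--     d = 0
--     for x in w:
--         c = freq.get(x, 0)
--         if c == 0:
--             d += 1
--         freq[x] = c + 1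
--     return freq, d
--
--
-- def count_wr(ueas, win=4):
--     # O(n) sliding window: distinct count maintained incrementally via a
--     # frequency map instead of building set(window) at every position.
--     n = len(ueas)
--     limit = n - win
--     if win <= 0 or limit <= 0:
--         return 0
--     freq, distinct = _scan(ueas[0:win])
--     count = 0
--     i = 0
--     while i < limit:
--         if distinct > 2:
--             count += 1
--             i += win + 1
--             if i < limit:
--                 freq, distinct = _scan(ueas[i:i + win])
--         else:
--             old = ueas[i]
--             c = freq[old] - 1
--             freq[old] = c
--             if c == 0:
--                 distinct -= 1
--             new = ueas[i + win]
--             c2 = freq.get(new, 0)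
--             if c2 == 0:
--                 distinct += 1
--             freq[new] = c2 + 1
--             i += 1
--     return count
-- ===== Notes on version B (the rewrite author's own statement) =====
-- stated objective: faster
-- what changed: A rebuilds set(window) at every position and burns a skip counter one step at a time; B maintains a frequency map and distinct counter updated incrementally while sliding the window and jumps the index directly past a counted window, making the scan O(n) instead of O(n*win).
-- outside the precondition, e.g. on count_wr([1, 2, 3, -1, -3], -1): A returns 1, B returns 0
import Mathlib
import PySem

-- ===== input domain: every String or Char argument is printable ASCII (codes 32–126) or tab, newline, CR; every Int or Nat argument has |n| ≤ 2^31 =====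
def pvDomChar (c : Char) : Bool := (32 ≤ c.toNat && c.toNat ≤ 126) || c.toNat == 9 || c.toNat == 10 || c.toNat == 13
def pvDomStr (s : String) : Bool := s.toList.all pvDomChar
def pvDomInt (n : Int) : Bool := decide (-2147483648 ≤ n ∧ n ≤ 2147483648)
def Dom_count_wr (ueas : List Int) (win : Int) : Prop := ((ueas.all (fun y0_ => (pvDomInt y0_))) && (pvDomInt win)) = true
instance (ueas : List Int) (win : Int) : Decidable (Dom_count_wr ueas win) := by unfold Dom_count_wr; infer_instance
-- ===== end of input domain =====

-- B replaces A's per-position set(window) rebuild (with a skip counter) by an O(n) sliding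
-- window keeping a frequency map and distinct counter updated incrementally (objective: faster).


-- ===== PORT A =====
-- for i in range(len(ueas)-win): if skip: skip-=1; continue; wind=ueas[i:i+win]; if len(set(wind))>2: count+=1; skip=win
def count_wr (ueas : List Int) (win : Int) : Int :=
  let st := (PySem.List.pyRange 0 ((ueas.length : Int) - win) 1).foldl
    (fun (st : Int × Int) i =>
      if st.2 ≠ 0 then (st.1, st.2 - 1)
      else
        let wind := PySem.List.slice ueas (some i) (some (i + win))
        if 2 < (PySem.Set.ofList wind).length then (st.1 + 1, win) else st)
    (0, 0)
  st.1

-- ===== PORT B =====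
-- _scan(w): build the frequency dict and distinct count of a window in one pass
def scanWr (w : List Int) : PySem.Dict Int Int × Int :=
  w.foldl (fun fd x =>
    let c := fd.1.getD x 0
    (fd.1.insert x (c + 1), if c = 0 then fd.2 + 1 else fd.2))
    (PySem.Dict.empty, 0)

-- the while loop of B; fuel bounds the number of iterations (i strictly increases, loop runs
-- while i < limit, so limit.toNat + 1 fuel suffices).  freq[old] is read as getD _ 0: old is a
-- member of the current window, so the key is present and this is exact.
def altLoopWr (ueas : List Int) (win limit : Int) :
    Nat → Int → Int → PySem.Dict Int Int → Int → Int
  | 0, _, count, _, _ => count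
  | fuel+1, i, count, freq, distinct =>
    if i < limit then
      if 2 < distinct then
        let i' := i + win + 1
        if i' < limit then
          let fd := scanWr (PySem.List.slice ueas (some i') (some (i' + win)))
          altLoopWr ueas win limit fuel i' (count + 1) fd.1 fd.2
        else count + 1
      else
        let old := PySem.List.pyGetD ueas i 0
        let c := freq.getD old 0 - 1
        let freq1 := freq.insert old c
        let distinct1 := if c = 0 then distinct - 1 else distinct
        let nw := PySem.List.pyGetD ueas (i + win) 0
        let c2 := freq1.getD nw 0
        let distinct2 := if c2 = 0 then distinct1 + 1 else distinct1
        let freq2 := freq1.insert nw (c2 + 1)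
        altLoopWr ueas win limit fuel (i + 1) count freq2 distinct2
    else count

def count_wr_alt (ueas : List Int) (win : Int) : Int :=
  let n : Int := ueas.length
  let limit := n - win
  if win ≤ 0 ∨ limit ≤ 0 then 0
  else
    let fd := scanWr (PySem.List.slice ueas (some 0) (some win))
    altLoopWr ueas win limit (limit.toNat + 1) 0 0 fd.1 fd.2

-- ===== PRECONDITION & SPEC =====
-- Pre_ excludes negative win — outside the natural domain of a window length — where A's slice
-- end i+win is negative and Python's negative-index wraparound makes the "window" reach to the
-- far end of the list instead of being a win-length window.
def Pre_count_wr (ueas : List Int) (win : Int) : Prop := 0 ≤ win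
instance (ueas : List Int) (win : Int) : Decidable (Pre_count_wr ueas win) := by unfold Pre_count_wr; infer_instance
def pvWitness_count_wr : List Int × Int := ([1, 2, 3, 0, 0, 0], 2)

def Spec_count_wr (ueas : List Int) (win : Int) (out : Int) : Prop := out = count_wr_alt ueas win
instance (ueas : List Int) (win : Int) (out : Int) : Decidable (Spec_count_wr ueas win out) := by unfold Spec_count_wr; infer_instance

-- ===== CLAIM (what is proved, stated in full; the proofs are below) =====
def Claim_equal_count_wr : Prop := ∀ (ueas : List Int) (win : Int), Dom_count_wr ueas win → Pre_count_wr ueas win → Spec_count_wr ueas win (count_wr ueas win)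

-- ===== LEMMAS AND PROOFS =====

-- the window at position i
def wWr (ueas : List Int) (win i : Int) : List Int :=
  PySem.List.slice ueas (some i) (some (i + win))

-- A's loop body, named for the proofs
def aBody (ueas : List Int) (win : Int) (st : Int × Int) (p : Int) : Int × Int :=
  if st.2 ≠ 0 then (st.1, st.2 - 1)
  else
    let wind := PySem.List.slice ueas (some p) (some (p + win))
    if 2 < (PySem.Set.ofList wind).length then (st.1 + 1, win) else st

lemma count_wr_eq_fold (ueas : List Int) (win : Int) :
    count_wr ueas win
      = ((PySem.List.pyRange 0 ((ueas.length : Int) - win) 1).foldl (aBody ueas win) (0, 0)).1 := rfl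

-- the common "jump" recursion both loops compute: at j, a hot window counts 1 and jumps win+1,
-- otherwise step 1; fuel-indexed (fuel (limit-j).toNat suffices when 1 ≤ win)
def jumpWr (ueas : List Int) (win limit : Int) : Nat → Int → Int
  | 0, _ => 0
  | f+1, j =>
    if j < limit then
      (if 2 < (PySem.Set.ofList (wWr ueas win j)).length
       then 1 + jumpWr ueas win limit f (j + win + 1)
       else jumpWr ueas win limit f (j + 1))
    else 0

lemma pyRange_one_nil (i limit : Int) (h : ¬ i < limit) : PySem.List.pyRange i limit 1 = [] := by
  rw [PySem.List.pyRange_of_pos i limit (by norm_num)]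
  simp [h]

lemma jumpWr_zero (ueas : List Int) (win limit : Int) (f : Nat) (j : Int) (hj : limit ≤ j) :
    jumpWr ueas win limit f j = 0 := by
  match f with
  | 0 => rfl
  | f+1 => simp only [jumpWr, if_neg (by omega : ¬ j < limit)]

lemma jumpWr_mono (ueas : List Int) (win limit : Int) (hwin : 1 ≤ win) :
    ∀ (f f' : Nat) (j : Int), (limit - j).toNat ≤ f → (limit - j).toNat ≤ f' →
      jumpWr ueas win limit f j = jumpWr ueas win limit f' j := by
  intro f
  induction f with
  | zero =>
    intro f' j h h'
    rw [jumpWr_zero _ _ _ _ _ (by omega), jumpWr_zero _ _ _ _ _ (by omega)]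
  | succ f ih =>
    intro f' j h h'
    match f' with
    | 0 =>
      rw [jumpWr_zero _ _ _ _ _ (by omega), jumpWr_zero _ _ _ _ _ (by omega)]
    | g+1 =>
      by_cases hj : j < limit
      · simp only [jumpWr, if_pos hj]
        split
        · rw [ih g (j + win + 1) (by omega) (by omega)]
        · rw [ih g (j + 1) (by omega) (by omega)]
      · simp only [jumpWr, if_neg hj]

lemma jumpWr_unfold_true (ueas : List Int) (win limit : Int) (hwin : 1 ≤ win) (j : Int)
    (hj : j < limit) (ht : 2 < (PySem.Set.ofList (wWr ueas win j)).length) :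
    jumpWr ueas win limit (limit - j).toNat j
      = 1 + jumpWr ueas win limit (limit - (j + win + 1)).toNat (j + win + 1) := by
  obtain ⟨m, hm⟩ : ∃ m, (limit - j).toNat = m + 1 := ⟨(limit - j).toNat - 1, by omega⟩
  rw [hm]
  simp only [jumpWr, if_pos hj, if_pos ht]
  rw [jumpWr_mono ueas win limit hwin m _ _ (by omega) (le_refl _)]

lemma jumpWr_unfold_false (ueas : List Int) (win limit : Int) (hwin : 1 ≤ win) (j : Int)
    (hj : j < limit) (ht : ¬ 2 < (PySem.Set.ofList (wWr ueas win j)).length) :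
    jumpWr ueas win limit (limit - j).toNat j
      = jumpWr ueas win limit (limit - (j + 1)).toNat (j + 1) := by
  obtain ⟨m, hm⟩ : ∃ m, (limit - j).toNat = m + 1 := ⟨(limit - j).toNat - 1, by omega⟩
  rw [hm]
  simp only [jumpWr, if_pos hj, if_neg ht]
  rw [jumpWr_mono ueas win limit hwin m _ _ (by omega) (le_refl _)]


-- distinct-count arithmetic
lemma setLen_perm (l l' : List Int) (h : l.Perm l') :
    (PySem.Set.ofList l).length = (PySem.Set.ofList l').length := by
  exact List.Perm.length_eq <|
    (List.perm_ext_iff_of_nodup (PySem.Set.nodup_ofList l) (PySem.Set.nodup_ofList l')).mpr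
      (fun a => by simp [PySem.Set.mem_ofList, h.mem_iff])

lemma setLen_append (l : List Int) (x : Int) :
    (PySem.Set.ofList (l ++ [x])).length
      = (PySem.Set.ofList l).length + (if x ∈ l then 0 else 1) := by
  rw [PySem.Set.ofList_append_singleton]
  unfold PySem.Set.add PySem.Set.contains
  by_cases hx : x ∈ l
  · have : List.contains (PySem.Set.ofList l) x = true := by
      simp [List.contains_eq_mem, PySem.Set.mem_ofList, hx]
    simp [hx]
  · have : List.contains (PySem.Set.ofList l) x = false := by
      simp [List.contains_eq_mem, PySem.Set.mem_ofList, hx]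
    simp [hx]

lemma setLen_cons (l : List Int) (x : Int) :
    (PySem.Set.ofList (x :: l)).length
      = (PySem.Set.ofList l).length + (if x ∈ l then 0 else 1) := by
  rw [setLen_perm _ _ (List.perm_append_singleton x l).symm, setLen_append]

-- scanWr builds exactly the counts and the distinct-cardinality of w
lemma scanWr_spec (w : List Int) :
    (∀ k, (scanWr w).1.getD k 0 = (w.count k : Int))
      ∧ (scanWr w).2 = ((PySem.Set.ofList w).length : Int) := by
  have main : ∀ (w acc : List Int) (d : PySem.Dict Int Int) (t : Int),
      (∀ k, d.getD k 0 = (acc.count k : Int)) → t = ((PySem.Set.ofList acc).length : Int) →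
      (∀ k, (w.foldl (fun fd x =>
          let c := fd.1.getD x 0
          (fd.1.insert x (c + 1), if c = 0 then fd.2 + 1 else fd.2)) (d, t)).1.getD k 0
        = ((acc ++ w).count k : Int))
      ∧ (w.foldl (fun fd x =>
          let c := fd.1.getD x 0
          (fd.1.insert x (c + 1), if c = 0 then fd.2 + 1 else fd.2)) (d, t)).2
        = ((PySem.Set.ofList (acc ++ w)).length : Int) := by
    intro w
    induction w with
    | nil => intro acc d t hd ht; simpa using ⟨hd, ht⟩
    | cons x w ih =>
      intro acc d t hd ht
      simp only [List.foldl_cons]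
      have hx : d.getD x 0 = (acc.count x : Int) := hd x
      have step := ih (acc ++ [x]) (d.insert x (d.getD x 0 + 1))
        (if d.getD x 0 = 0 then t + 1 else t)
        (by
          intro k
          rw [PySem.Dict.getD_insert]
          by_cases hk : k = x
          · subst hk; rw [if_pos rfl, hx]; simp [List.count_append]
          · rw [if_neg hk, hd k]
            simp [List.count_append, Ne.symm hk])
        (by
          rw [setLen_append, ht, hx]
          by_cases hmem : x ∈ acc
          · rw [if_pos hmem]
            have : acc.count x ≠ 0 := by
              simpa [List.count_eq_zero] using hmem
            simp [this]
          · rw [if_neg hmem]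
            have : acc.count x = 0 := by simpa [List.count_eq_zero] using hmem
            simp [this])
      simpa using step
  have h := main w [] PySem.Dict.empty 0
    (by intro k; simp [PySem.Dict.getD_empty])
    (by simp [PySem.Set.ofList_nil])
  simpa [scanWr] using h

-- A's fold from position i with state (c, s) computes c + jump(i+s)
lemma foldA_eq_jump (ueas : List Int) (win limit : Int) (hwin : 1 ≤ win)
    (hlim : limit = (ueas.length : Int) - win) :
    ∀ (k : Nat) (i c s : Int), 0 ≤ s → (limit - i).toNat ≤ k →
      ((PySem.List.pyRange i limit 1).foldl (aBody ueas win) (c, s)).1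
      = c + jumpWr ueas win limit ((limit - (i + s)).toNat) (i + s) := by
  intro k
  induction k with
  | zero =>
    intro i c s hs hk
    rw [pyRange_one_nil _ _ (by omega), jumpWr_zero _ _ _ _ _ (by omega)]
    simp
  | succ k ih =>
    intro i c s hs hk
    by_cases hi : i < limit
    · rw [PySem.List.pyRange_one_cons hi, List.foldl_cons]
      by_cases hs0 : s = 0
      · subst hs0
        by_cases ht : 2 < (PySem.Set.ofList (PySem.List.slice ueas (some i) (some (i + win)))).length
        · rw [show aBody ueas win (c, 0) i = (c + 1, win) from by simp [aBody, ht]]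
          rw [ih (i+1) (c+1) win (by omega) (by omega)]
          simp only [add_zero]
          rw [jumpWr_unfold_true ueas win limit hwin i hi (by simpa [wWr] using ht)]
          have harg : i + 1 + win = i + win + 1 := by ring
          rw [harg]
          ring
        · rw [show aBody ueas win (c, 0) i = (c, 0) from by simp [aBody, ht]]
          rw [ih (i+1) c 0 (by omega) (by omega)]
          simp only [add_zero]
          rw [jumpWr_unfold_false ueas win limit hwin i hi (by simpa [wWr] using ht)]
      · rw [show aBody ueas win (c, s) i = (c, s - 1) from by simp [aBody, hs0]]
        rw [ih (i+1) c (s-1) (by omega) (by omega)]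
        have harg : i + 1 + (s - 1) = i + s := by ring
        rw [harg]
    · rw [pyRange_one_nil _ _ hi, jumpWr_zero _ _ _ _ _ (by omega)]
      simp

-- sliding the window one step: decompositions of the window lists
lemma wWr_cons (ueas : List Int) (win i : Int) (hwin : 1 ≤ win) (hi : 0 ≤ i)
    (hlt : i + win < (ueas.length : Int)) :
    wWr ueas win i = ueas.getD i.toNat 0 :: PySem.List.slice ueas (some (i+1)) (some (i + win))
      ∧ wWr ueas win (i+1)
        = PySem.List.slice ueas (some (i+1)) (some (i + win)) ++ [ueas.getD (i + win).toNat 0] := by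
  have hn : i.toNat < ueas.length := by omega
  have hn2 : (i + win).toNat < ueas.length := by omega
  have hdrop : ueas.drop i.toNat = ueas[i.toNat] :: ueas.drop (i.toNat + 1) := by
    exact List.drop_eq_getElem_cons hn
  constructor
  · rw [wWr, PySem.List.slice_toNat _ hi (by omega), PySem.List.slice_toNat _ (by omega) (by omega)]
    rw [hdrop]
    have h1 : (i + win).toNat - i.toNat = ((i + win).toNat - (i + 1).toNat) + 1 := by omega
    rw [h1, List.take_succ_cons]
    have h2 : (i + 1).toNat = i.toNat + 1 := by omega
    rw [h2, List.getD_eq_getElem _ _ hn]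
  · rw [wWr, PySem.List.slice_toNat _ (by omega) (by omega),
        PySem.List.slice_toNat _ (by omega) (by omega)]
    have h2 : (i + 1).toNat = i.toNat + 1 := by omega
    have h3 : (i + 1 + win).toNat - (i.toNat + 1) = ((i + win).toNat - (i.toNat + 1)) + 1 := by omega
    rw [h2, h3]
    have hlen : (i + win).toNat - (i.toNat + 1) < (ueas.drop (i.toNat + 1)).length := by
      rw [List.length_drop]; omega
    rw [List.take_succ_eq_append_getElem hlen, List.getElem_drop]
    rw [List.getD_eq_getElem _ _ hn2]
    congr 3
    omega

-- B's loop computes count + jump(i) under the window invariant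
lemma altLoop_eq_jump (ueas : List Int) (win limit : Int) (hwin : 1 ≤ win)
    (hlim : limit = (ueas.length : Int) - win) :
    ∀ (fuel : Nat) (i count : Int) (freq : PySem.Dict Int Int) (distinct : Int),
      0 ≤ i → (limit - i).toNat < fuel →
      (∀ k, freq.getD k 0 = ((wWr ueas win i).count k : Int)) →
      distinct = ((PySem.Set.ofList (wWr ueas win i)).length : Int) →
      altLoopWr ueas win limit fuel i count freq distinct
        = count + jumpWr ueas win limit ((limit - i).toNat) i := by
  intro fuel
  induction fuel with
  | zero => intro i count freq distinct hi hf hfr hdist; omega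
  | succ fuel ih =>
    intro i count freq distinct hi hf hfr hdist
    by_cases hlt : i < limit
    · by_cases ht : 2 < distinct
      · have htn : 2 < (PySem.Set.ofList (wWr ueas win i)).length := by
          rw [hdist] at ht; exact_mod_cast ht
        by_cases h2 : i + win + 1 < limit
        · simp only [altLoopWr, if_pos hlt, if_pos ht, if_pos h2]
          obtain ⟨hc, hd⟩ := scanWr_spec (PySem.List.slice ueas (some (i+win+1)) (some (i+win+1+win)))
          rw [ih (i+win+1) (count+1) _ _ (by omega) (by omega) (fun k => hc k) hd]
          rw [jumpWr_unfold_true ueas win limit hwin i hlt htn]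
          ring
        · simp only [altLoopWr, if_pos hlt, if_pos ht, if_neg h2]
          rw [jumpWr_unfold_true ueas win limit hwin i hlt htn,
              jumpWr_zero _ _ _ _ _ (by omega)]
          ring
      · have htn : ¬ 2 < (PySem.Set.ofList (wWr ueas win i)).length := by
          intro hcon
          exact ht (by rw [hdist]; exact_mod_cast hcon)
        simp only [altLoopWr, if_pos hlt, if_neg ht]
        have hiw : i + win < (ueas.length : Int) := by omega
        obtain ⟨hw1, hw2⟩ := wWr_cons ueas win i hwin hi hiw
        set old := PySem.List.pyGetD ueas i 0 with hold_def
        set mid := PySem.List.slice ueas (some (i+1)) (some (i + win)) with hmid_def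
        have hold : old = ueas.getD i.toNat 0 := PySem.List.pyGetD_of_nonneg ueas 0 hi
        set nw := PySem.List.pyGetD ueas (i + win) 0 with hnw_def
        have hnw : nw = ueas.getD (i + win).toNat 0 := PySem.List.pyGetD_of_nonneg ueas 0 (by omega)
        rw [← hold] at hw1
        rw [← hnw] at hw2
        set c := freq.getD old 0 - 1 with hc_def
        have hcw : ∀ k, (wWr ueas win i).count k = mid.count k + (if k = old then 1 else 0) := by
          intro k
          rw [hw1]
          rcases eq_or_ne k old with h | h
          · simp [h]
          · simp [h, Ne.symm h]
        have hc' : c = (mid.count old : Int) := by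
          have := hfr old
          rw [hc_def, this, hcw old]
          simp
        set freq1 := freq.insert old c with hfreq1_def
        have hfr1 : ∀ k, freq1.getD k 0 = (mid.count k : Int) := by
          intro k
          rw [hfreq1_def, PySem.Dict.getD_insert]
          by_cases hk : k = old
          · rw [if_pos hk, hc', hk]
          · rw [if_neg hk, hfr k, hcw k, if_neg hk]
            simp
        set d1 := (if c = 0 then distinct - 1 else distinct : Int) with hd1_def
        have hd1 : d1 = ((PySem.Set.ofList mid).length : Int) := by
          have hdw : distinct = ((PySem.Set.ofList mid).length : Int) + (if old ∈ mid then 0 else 1) := by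
            rw [hdist, hw1, setLen_cons]
            by_cases hm : old ∈ mid
            · simp [hm]
            · simp [hm]
          by_cases hc0 : c = 0
          · have hnotm : old ∉ mid := by
              rw [hc'] at hc0
              exact List.count_eq_zero.mp (by exact_mod_cast hc0)
            rw [hd1_def, if_pos hc0, hdw, if_neg hnotm]
            ring
          · have hm : old ∈ mid := by
              by_contra hnm
              exact hc0 (by rw [hc']; simp [List.count_eq_zero.mpr hnm])
            rw [hd1_def, if_neg hc0, hdw, if_pos hm]
            ring
        set c2 := freq1.getD nw 0 with hc2_def
        have hc2 : c2 = (mid.count nw : Int) := hfr1 nw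
        have hcw' : ∀ k, (wWr ueas win (i+1)).count k = mid.count k + (if k = nw then 1 else 0) := by
          intro k
          rw [hw2]
          rcases eq_or_ne k nw with h | h
          · simp [h, List.count_append]
          · simp [List.count_append, h, Ne.symm h]
        have hd2 : (if c2 = 0 then d1 + 1 else d1) = ((PySem.Set.ofList (wWr ueas win (i+1))).length : Int) := by
          rw [hw2, setLen_append]
          by_cases hc20 : c2 = 0
          · have hnm : nw ∉ mid := by
              rw [hc2] at hc20
              exact List.count_eq_zero.mp (by exact_mod_cast hc20)
            rw [if_pos hc20, if_neg hnm, hd1]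
            push_cast
            ring
          · have hm : nw ∈ mid := by
              by_contra hnm
              exact hc20 (by rw [hc2]; simp [List.count_eq_zero.mpr hnm])
            rw [if_neg hc20, if_pos hm, hd1]
            push_cast
            ring
        have hfr2 : ∀ k, (freq1.insert nw (c2 + 1)).getD k 0 = ((wWr ueas win (i+1)).count k : Int) := by
          intro k
          rw [PySem.Dict.getD_insert, hcw' k]
          by_cases hk : k = nw
          · rw [if_pos hk, if_pos hk, hc2, hk]
            push_cast
            ring
          · rw [if_neg hk, if_neg hk, hfr1 k]
            simp
        rw [ih (i+1) count _ _ (by omega) (by omega) hfr2 hd2]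
        rw [jumpWr_unfold_false ueas win limit hwin i hlt htn]
    · simp only [altLoopWr, if_neg hlt]
      rw [jumpWr_zero _ _ _ _ _ (by omega)]
      ring

-- win = 0: every window is empty, A's fold never fires
lemma foldA_zero_win (ueas : List Int) :
    count_wr ueas 0 = 0 := by
  rw [count_wr_eq_fold]
  have key : ∀ (l : List Int),
      l.foldl (aBody ueas 0) ((0:Int), (0:Int)) = (0, 0) := by
    intro l
    induction l with
    | nil => rfl
    | cons p l ihl =>
      rw [List.foldl_cons]
      have hsl : PySem.List.slice ueas (some p) (some p) = [] := by
        apply List.eq_nil_of_length_eq_zero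
        rw [PySem.List.length_slice]
        omega
      rw [show aBody ueas 0 (0, 0) p = (0, 0) from by simp [aBody, hsl, PySem.Set.ofList_nil]]
      exact ihl
  rw [key]

-- ===== VERDICT (by name: the statement is the Claim_ definition above) =====
theorem count_wr_spec : Claim_equal_count_wr := by
  intro ueas win hdom hpre
  unfold Spec_count_wr
  unfold Pre_count_wr at hpre
  by_cases hw : win ≤ 0
  · have hw0 : win = 0 := le_antisymm hw hpre
    subst hw0
    rw [foldA_zero_win]
    simp [count_wr_alt]
  · have hwin : 1 ≤ win := by omega
    by_cases hl : (ueas.length : Int) - win ≤ 0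
    · have hB : count_wr_alt ueas win = 0 := by
        unfold count_wr_alt
        simp only [if_pos (Or.inr hl)]
      have hA : count_wr ueas win = 0 := by
        rw [count_wr_eq_fold, pyRange_one_nil _ _ (by omega)]
        rfl
      rw [hA, hB]
    · have hA := foldA_eq_jump ueas win ((ueas.length : Int) - win) hwin rfl
        ((ueas.length : Int) - win).toNat 0 0 0 le_rfl (by omega)
      rw [count_wr_eq_fold, hA]
      obtain ⟨hc, hd⟩ := scanWr_spec (PySem.List.slice ueas (some 0) (some win))
      have hw0 : wWr ueas win 0 = PySem.List.slice ueas (some 0) (some win) := by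
        unfold wWr
        rw [zero_add]
      have hB := altLoop_eq_jump ueas win ((ueas.length : Int) - win) hwin rfl
        (((ueas.length : Int) - win).toNat + 1) 0 0
        (scanWr (PySem.List.slice ueas (some 0) (some win))).1
        (scanWr (PySem.List.slice ueas (some 0) (some win))).2
        le_rfl (by omega)
        (by rw [hw0]; exact hc)
        (by rw [hw0]; exact hd)
      unfold count_wr_alt
      simp only [if_neg (by push Not; omega : ¬ (win ≤ 0 ∨ (ueas.length : Int) - win ≤ 0))]
      rw [hB]
      simp
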